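-- pv_equiv track=rewrite | github.com/L40S38/English-net-dict | backend/core/services/scraper/etymology_extractors.py | _extract_angle_segment
-- ===== SOURCE A (Python) =====
-- def _extract_angle_segment(text: str, start: int) -> tuple[str | None, int]:
--     if start < 0 or start >= len(text) or text[start] != "<":
--         return None, start
--     depth = 0
--     i = start
--     while i < len(text):
--         ch = text[i]
--         if ch == "<":
--             depth += 1
--         elif ch == ">":
--             depth -= 1
--             if depth == 0:
--                 return text[start + 1 : i], i + 1
--         i += 1
--     return None, start + 1
-- ===== SOURCE B (Python) =====
-- def _parse(text, i):
--     # assumes text[i] == "<"; returns index of the ">" closing this level, or None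
--     j = i + 1
--     n = len(text)
--     while j < n:
--         ch = text[j]
--         if ch == ">":
--             return j
--         if ch == "<":
--             k = _parse(text, j)
--             if k is None:
--                 return None
--             j = k + 1
--         else:
--             j += 1
--     return None
--
--
-- def _extract_angle_segment(text, start):
--     if start < 0 or start >= len(text) or text[start] != "<":
--         return None, start
--     close = _parse(text, start)
--     if close is None:
--         return None, start + 1
--     return text[start + 1 : close], close + 1
-- ===== Notes on version B (the rewrite author's own statement) =====
-- stated objective: alternative
-- what changed: Replaces A's single while-loop with a shared depth counter by a recursive-descent parser: a helper scans one nesting level and recurses on each nested '<', the call stack replacing the depth counter.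
import Mathlib
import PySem

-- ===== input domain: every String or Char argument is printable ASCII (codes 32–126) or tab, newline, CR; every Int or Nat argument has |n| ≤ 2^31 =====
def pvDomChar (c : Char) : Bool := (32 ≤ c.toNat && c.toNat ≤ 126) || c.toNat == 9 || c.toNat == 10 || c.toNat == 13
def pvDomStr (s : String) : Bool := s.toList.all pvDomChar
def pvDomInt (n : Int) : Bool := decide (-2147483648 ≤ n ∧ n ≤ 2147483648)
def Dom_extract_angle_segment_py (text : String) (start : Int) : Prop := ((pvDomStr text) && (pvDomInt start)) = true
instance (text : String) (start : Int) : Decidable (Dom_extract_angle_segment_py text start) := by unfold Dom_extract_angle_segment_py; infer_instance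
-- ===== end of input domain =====

-- B replaces A's depth-counter scan by a recursive-descent parser (the call stack tracks nesting); objective: alternative, same cost.

-- ===== PORT A =====
-- A's while loop: state (i, depth), structural recursion over the remaining characters text[i:].
def pvALoop : List Char → Nat → Int → Option Nat
  | [], _, _ => none
  | c :: rest, i, depth =>
    if c = '<' then pvALoop rest (i+1) (depth+1)
    else if c = '>' then
      if depth - 1 = 0 then some i else pvALoop rest (i+1) (depth - 1)
    else pvALoop rest (i+1) depth

def extract_angle_segment_py (text : String) (start : Int) : Option String × Int :=
  if start < 0 ∨ (text.toList.length : Int) ≤ start ∨ PySem.List.pyGet? text.toList start ≠ some '<' then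
    (none, start)
  else
    match pvALoop (text.toList.drop start.toNat) start.toNat 0 with
    | some i => (some (String.ofList (PySem.List.slice text.toList (some (start+1)) (some (i:Int)))), (i:Int) + 1)
    | none => (none, start + 1)

-- ===== PORT B =====
-- B's _parse: scan one nesting level from index j; a nested '<' recurses and the scan resumes just after the inner close.
def pvBScan (cs : List Char) (j : Nat) : Option {k : Nat // j ≤ k ∧ k < cs.length} :=
  if h : j < cs.length then
    if cs[j] = '>' then some ⟨j, Nat.le_refl j, h⟩
    else if cs[j] = '<' then
      match pvBScan cs (j+1) with
      | none => none
      | some k =>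
        match pvBScan cs (k.1+1) with
        | none => none
        | some k' => some ⟨k'.1, by have h2 := k.2; have h3 := k'.2; omega, k'.2.2⟩
    else
      match pvBScan cs (j+1) with
      | none => none
      | some k => some ⟨k.1, Nat.le_of_succ_le k.2.1, k.2.2⟩
  else none
termination_by cs.length - j
decreasing_by
  · omega
  · omega
  · omega

def extract_angle_segment_py_alt (text : String) (start : Int) : Option String × Int :=
  if start < 0 ∨ (text.toList.length : Int) ≤ start ∨ PySem.List.pyGet? text.toList start ≠ some '<' then
    (none, start)
  else
    match pvBScan text.toList (start.toNat + 1) with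
    | none => (none, start + 1)
    | some k => (some (String.ofList (PySem.List.slice text.toList (some (start+1)) (some (k.1:Int)))), (k.1:Int) + 1)

-- ===== PRECONDITION & SPEC =====
def Spec_extract_angle_segment_py (text : String) (start : Int) (out : Option String × Int) : Prop := out = extract_angle_segment_py_alt text start
instance (text : String) (start : Int) (out : Option String × Int) : Decidable (Spec_extract_angle_segment_py text start out) := by unfold Spec_extract_angle_segment_py; infer_instance

-- ===== CLAIM (what is proved, stated in full; the proofs are below) =====
def Claim_equal_extract_angle_segment_py : Prop := ∀ (text : String) (start : Int), Dom_extract_angle_segment_py text start → Spec_extract_angle_segment_py text start (extract_angle_segment_py text start)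

-- ===== LEMMAS AND PROOFS =====

lemma pvALoop_bounds : ∀ (cs : List Char) (i : Nat) (d : Int) (j : Nat),
    pvALoop cs i d = some j → i ≤ j ∧ j < i + cs.length := by
  intro cs
  induction cs with
  | nil => intro i d j h; simp [pvALoop] at h
  | cons c rest ih =>
    intro i d j h
    simp only [pvALoop] at h
    split_ifs at h with h1 h2 h3
    · have := ih (i+1) (d+1) j h; simp only [List.length_cons]; omega
    · simp only [Option.some.injEq] at h; simp only [List.length_cons]; omega
    · have := ih (i+1) (d-1) j h; simp only [List.length_cons]; omega
    · have := ih (i+1) d j h; simp only [List.length_cons]; omega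

-- a scan at depth d+1 first closes one level (a depth-1 scan) and continues at depth d
lemma pvALoop_succ : ∀ (n : Nat) (cs : List Char) (i : Nat) (d : Int), cs.length - i ≤ n → 1 ≤ d →
    pvALoop (cs.drop i) i (d+1) = (pvALoop (cs.drop i) i 1).bind (fun j => pvALoop (cs.drop (j+1)) (j+1) d) := by
  intro n
  induction n with
  | zero =>
    intro cs i d h hd
    rw [List.drop_eq_nil_of_le (by omega)]
    simp [pvALoop]
  | succ n ih =>
    intro cs i d h hd
    by_cases hi : i < cs.length
    · have hdrop : cs.drop i = cs[i] :: cs.drop (i+1) := (List.getElem_cons_drop hi).symm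
      rw [hdrop]
      by_cases hc1 : cs[i] = '<'
      · simp only [pvALoop, if_pos hc1]
        rw [ih cs (i+1) (d+1) (by omega) (by omega), ih cs (i+1) 1 (by omega) le_rfl]
        cases hx : pvALoop (cs.drop (i+1)) (i+1) 1 with
        | none => simp
        | some j =>
          simp only [Option.bind_some]
          have hb := pvALoop_bounds _ _ _ _ hx
          rw [List.length_drop] at hb
          exact ih cs (j+1) d (by omega) hd
      · by_cases hc2 : cs[i] = '>'
        · simp only [pvALoop, if_neg hc1, if_pos hc2]
          rw [if_neg (by omega : ¬ (d + 1 - 1 = 0)), if_pos (by norm_num : (1:Int) - 1 = 0)]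
          simp only [Option.bind_some]
          have hde : d + 1 - 1 = d := by ring
          rw [hde]
        · simp only [pvALoop, if_neg hc1, if_neg hc2]
          exact ih cs (i+1) d (by omega) hd
    · rw [List.drop_eq_nil_of_le (by omega)]
      simp [pvALoop]

-- B's one-level scan computes exactly A's depth-1 close index
lemma pvBScan_aLoop : ∀ (n : Nat) (cs : List Char) (j : Nat), cs.length - j ≤ n →
    pvALoop (cs.drop j) j 1 = (pvBScan cs j).map Subtype.val := by
  intro n
  induction n with
  | zero =>
    intro cs j h
    rw [List.drop_eq_nil_of_le (by omega), pvBScan, dif_neg (by omega)]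
    simp [pvALoop]
  | succ n ih =>
    intro cs j h
    by_cases hj : j < cs.length
    · have hdrop : cs.drop j = cs[j] :: cs.drop (j+1) := (List.getElem_cons_drop hj).symm
      rw [hdrop, pvBScan, dif_pos hj]
      by_cases hgt : cs[j] = '>'
      · rw [if_pos hgt]
        simp [pvALoop, hgt]
      · by_cases hlt : cs[j] = '<'
        · rw [if_neg hgt, if_pos hlt]
          simp only [pvALoop, if_pos hlt]
          rw [pvALoop_succ cs.length cs (j+1) 1 (by omega) le_rfl]
          rw [ih cs (j+1) (by omega)]
          cases hbs : pvBScan cs (j+1) with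
          | none => simp
          | some k =>
            simp only [Option.map_some, Option.bind_some]
            rw [ih cs (k.1+1) (by have := k.2; omega)]
            cases hbs2 : pvBScan cs (k.1+1) with
            | none => simp
            | some k' => simp
        · rw [if_neg hgt, if_neg hlt]
          simp only [pvALoop, if_neg hlt, if_neg hgt]
          rw [ih cs (j+1) (by omega)]
          cases hbs : pvBScan cs (j+1) with
          | none => simp
          | some k => simp
    · rw [List.drop_eq_nil_of_le (by omega), pvBScan, dif_neg hj]
      simp [pvALoop]

-- ===== VERDICT (by name: the statement is the Claim_ definition above) =====
theorem extract_angle_segment_py_spec : Claim_equal_extract_angle_segment_py := by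
  intro text start _
  unfold Spec_extract_angle_segment_py extract_angle_segment_py extract_angle_segment_py_alt
  by_cases hg : start < 0 ∨ (text.toList.length : Int) ≤ start ∨ PySem.List.pyGet? text.toList start ≠ some '<'
  · rw [if_pos hg, if_pos hg]
  · rw [if_neg hg, if_neg hg]
    push Not at hg
    obtain ⟨h0, hlen, hch⟩ := hg
    have hs : (start.toNat : Int) = start := Int.toNat_of_nonneg h0
    have hsl : start.toNat < text.toList.length := by omega
    have hchar : text.toList[start.toNat] = '<' := by
      rw [← hs] at hch
      rw [PySem.List.pyGet?_natCast] at hch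
      simp [List.getElem?_eq_getElem hsl] at hch
      exact hch
    have hdrop : text.toList.drop start.toNat = text.toList[start.toNat] :: text.toList.drop (start.toNat+1) :=
      (List.getElem_cons_drop hsl).symm
    rw [hdrop, hchar]
    simp only [pvALoop]
    have h01 : (0:Int) + 1 = 1 := by norm_num
    rw [h01, pvBScan_aLoop text.toList.length text.toList (start.toNat+1) (by omega)]
    cases hbs : pvBScan text.toList (start.toNat+1) with
    | none => simp
    | some k => simp
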